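-- pv_equiv track=rewrite | github.com/mvideet/Cipher | src/ml/prompt_parser.py | _choose_classification_metric
-- ===== SOURCE A (Python) =====
-- def _choose_classification_metric(prompt: str) -> str:
--     """Choose appropriate classification metric based on prompt context"""
--
--     if any(word in prompt for word in ["recall", "sensitivity", "catch", "detect"]):
--         return "recall"
--     elif any(word in prompt for word in ["precision", "exact", "avoid false"]):
--         return "precision"
--     elif any(word in prompt for word in ["f1", "balance", "harmonic"]):
--         return "f1"
--     else:
--         return "accuracy"
-- ===== SOURCE B (Python) =====
-- _TABLE = [
--     ("recall", "recall"), ("sensitivity", "recall"), ("catch", "recall"), ("detect", "recall"),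
--     ("precision", "precision"), ("exact", "precision"), ("avoid false", "precision"),
--     ("f1", "f1"), ("balance", "f1"), ("harmonic", "f1"),
-- ]
-- _PRIORITY = ["recall", "precision", "f1"]
--
-- def _choose_classification_metric(prompt: str) -> str:
--     """Single left-to-right scan over the prompt's positions: at each position
--     record every table keyword that starts there (multi-pattern scan), then
--     return the highest-priority metric found."""
--     found = set()
--     for i in range(len(prompt) + 1):
--         for kw, metric in _TABLE:
--             if prompt.startswith(kw, i):
--                 found.add(metric)
--     for metric in _PRIORITY:
--         if metric in found:
--             return metric
--     return "accuracy"
-- ===== Notes on version B (the rewrite author's own statement) =====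
-- stated objective: alternative
-- what changed: Replaced the per-keyword if/elif substring-membership scans with a single left-to-right scan over the prompt's positions that records every table keyword starting at each position into a set of found metrics, followed by a priority lookup; a multi-pattern position scan instead of repeated substring searches.
import Mathlib
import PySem

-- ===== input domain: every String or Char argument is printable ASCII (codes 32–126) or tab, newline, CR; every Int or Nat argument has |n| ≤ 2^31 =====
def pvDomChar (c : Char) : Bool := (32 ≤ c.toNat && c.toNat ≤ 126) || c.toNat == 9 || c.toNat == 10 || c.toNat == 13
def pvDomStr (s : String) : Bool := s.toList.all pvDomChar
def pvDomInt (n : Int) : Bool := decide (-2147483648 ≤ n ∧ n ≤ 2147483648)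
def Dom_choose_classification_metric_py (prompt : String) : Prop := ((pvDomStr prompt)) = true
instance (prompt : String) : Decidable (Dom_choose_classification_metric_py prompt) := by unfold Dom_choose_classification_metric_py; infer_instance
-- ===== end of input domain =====

-- B replaces A's per-keyword if/elif substring scans by one left-to-right scan over the
-- prompt's positions that collects the set of metrics whose keyword starts somewhere,
-- then a priority lookup: an alternative multi-pattern-scan decomposition, same cost.

-- ===== PORT A =====
def choose_classification_metric_py (prompt : String) : String :=
  if (["recall", "sensitivity", "catch", "detect"].any (fun w => PySem.Str.isIn w prompt)) then "recall"
  else if (["precision", "exact", "avoid false"].any (fun w => PySem.Str.isIn w prompt)) then "precision"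
  else if (["f1", "balance", "harmonic"].any (fun w => PySem.Str.isIn w prompt)) then "f1"
  else "accuracy"

-- ===== PORT B =====
def pvTable : List (String × String) :=
  [("recall", "recall"), ("sensitivity", "recall"), ("catch", "recall"), ("detect", "recall"),
   ("precision", "precision"), ("exact", "precision"), ("avoid false", "precision"),
   ("f1", "f1"), ("balance", "f1"), ("harmonic", "f1")]

def pvPriority : List String := ["recall", "precision", "f1"]

-- Python's prompt.startswith(kw, i) for 0 ≤ i ≤ len(prompt) is exactly
-- 'PySem.Chars.startswith (prompt.toList.drop i) kw.toList' (exact: offset startswith = startswith of the suffix).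
def pvFound (l : List Char) : PySem.Set String :=
  (PySem.List.pyRange 0 ((l.length : Int) + 1) 1).foldl
    (fun acc i => pvTable.foldl
      (fun acc2 p => if PySem.Chars.startswith (l.drop i.toNat) p.1.toList then PySem.Set.add acc2 p.2 else acc2)
      acc)
    PySem.Set.empty

def choose_classification_metric_py_alt (prompt : String) : String :=
  let found := pvFound prompt.toList
  ((pvPriority.find? (fun m => PySem.Set.contains found m)).getD "accuracy")

-- ===== PRECONDITION & SPEC =====
def Spec_choose_classification_metric_py (prompt : String) (out : String) : Prop := out = choose_classification_metric_py_alt prompt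
instance (prompt : String) (out : String) : Decidable (Spec_choose_classification_metric_py prompt out) := by unfold Spec_choose_classification_metric_py; infer_instance

-- ===== CLAIM (what is proved, stated in full; the proofs are below) =====
def Claim_equal_choose_classification_metric_py : Prop := ∀ (prompt : String), Dom_choose_classification_metric_py prompt → Spec_choose_classification_metric_py prompt (choose_classification_metric_py prompt)

-- ===== LEMMAS AND PROOFS =====

-- membership after a fold whose step only ever adds elements characterised by Q
theorem pv_mem_foldl {α β : Type} (f : List β → α → List β) (Q : α → β → Prop)
    (hf : ∀ acc x y, y ∈ f acc x ↔ y ∈ acc ∨ Q x y) :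
    ∀ (xs : List α) (s : List β) (y : β), y ∈ xs.foldl f s ↔ y ∈ s ∨ ∃ x ∈ xs, Q x y := by
  intro xs
  induction xs with
  | nil => simp
  | cons x xs ih =>
    intro s y
    simp only [List.foldl_cons, ih, hf, List.mem_cons]
    constructor
    · rintro (⟨h | h⟩ | ⟨z, hz, hq⟩)
      · exact Or.inl h
      · exact Or.inr ⟨x, Or.inl rfl, h⟩
      · exact Or.inr ⟨z, Or.inr hz, hq⟩
    · rintro (h | ⟨z, (rfl | hz), hq⟩)
      · exact Or.inl (Or.inl h)
      · exact Or.inl (Or.inr hq)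
      · exact Or.inr ⟨z, hz, hq⟩

-- ∃ position in range(len+1) where kw starts  ↔  kw in prompt
theorem pv_exists_pos_iff_isIn (l kw : List Char) :
    (∃ i ∈ PySem.List.pyRange 0 ((l.length : Int) + 1) 1,
        PySem.Chars.startswith (l.drop i.toNat) kw = true)
      ↔ PySem.Chars.isIn kw l = true := by
  rw [← PySem.Chars.exists_prefix_drop_iff_isIn]
  constructor
  · rintro ⟨i, hi, hs⟩
    exact ⟨i.toNat, (PySem.Chars.startswith_iff _ _).1 hs⟩
  · rintro ⟨j, hj⟩
    by_cases h : j ≤ l.length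
    · refine ⟨(j : Int), ?_, ?_⟩
      · rw [PySem.List.mem_pyRange_one]; omega
      · rw [PySem.Chars.startswith_iff]; simpa using hj
    · have hd : l.drop j = [] := List.drop_eq_nil_of_le (by omega)
      have hkw : kw = [] := List.prefix_nil.mp (hd ▸ hj)
      refine ⟨0, ?_, ?_⟩
      · rw [PySem.List.mem_pyRange_one]; omega
      · rw [PySem.Chars.startswith_iff]; simp [hkw]

theorem pv_mem_found (l : List Char) (y : String) :
    y ∈ pvFound l
    ↔ ∃ p ∈ pvTable, PySem.Chars.isIn p.1.toList l = true ∧ p.2 = y := by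
  unfold pvFound
  rw [pv_mem_foldl _
      (fun i y => ∃ p ∈ pvTable, PySem.Chars.startswith (l.drop i.toNat) p.1.toList = true ∧ p.2 = y)
      (fun acc i y => by
        rw [pv_mem_foldl _
            (fun p y => PySem.Chars.startswith (l.drop i.toNat) p.1.toList = true ∧ p.2 = y)
            (fun acc2 p y => by split_ifs with h <;> simp [PySem.Set.mem_add, h, eq_comm])])]
  simp only [PySem.Set.empty, List.not_mem_nil, false_or]
  constructor
  · rintro ⟨i, _, p, hp, hs, rfl⟩
    exact ⟨p, hp, (pv_exists_pos_iff_isIn _ _).1 ⟨i, by assumption, hs⟩, rfl⟩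
  · rintro ⟨p, hp, hin, rfl⟩
    obtain ⟨i, hi, hs⟩ := (pv_exists_pos_iff_isIn l p.1.toList).2 hin
    exact ⟨i, hi, p, hp, hs, rfl⟩

theorem pv_c_recall (prompt : String) :
    PySem.Set.contains (pvFound prompt.toList) "recall"
      = (["recall", "sensitivity", "catch", "detect"].any (fun w => PySem.Str.isIn w prompt)) := by
  rw [Bool.eq_iff_iff, PySem.Set.contains_iff, pv_mem_found]
  simp [pvTable]

theorem pv_c_precision (prompt : String) :
    PySem.Set.contains (pvFound prompt.toList) "precision"
      = (["precision", "exact", "avoid false"].any (fun w => PySem.Str.isIn w prompt)) := by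
  rw [Bool.eq_iff_iff, PySem.Set.contains_iff, pv_mem_found]
  simp [pvTable]

theorem pv_c_f1 (prompt : String) :
    PySem.Set.contains (pvFound prompt.toList) "f1"
      = (["f1", "balance", "harmonic"].any (fun w => PySem.Str.isIn w prompt)) := by
  rw [Bool.eq_iff_iff, PySem.Set.contains_iff, pv_mem_found]
  simp [pvTable]

-- ===== VERDICT (by name: the statement is the Claim_ definition above) =====
theorem choose_classification_metric_py_spec : Claim_equal_choose_classification_metric_py := by
  intro prompt _
  unfold Spec_choose_classification_metric_py choose_classification_metric_py choose_classification_metric_py_alt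
  simp only [pvPriority, List.find?, pv_c_recall, pv_c_precision, pv_c_f1]
  cases hb1 : (["recall", "sensitivity", "catch", "detect"].any (fun w => PySem.Str.isIn w prompt)) <;>
    cases hb2 : (["precision", "exact", "avoid false"].any (fun w => PySem.Str.isIn w prompt)) <;>
      cases hb3 : (["f1", "balance", "harmonic"].any (fun w => PySem.Str.isIn w prompt)) <;>
        simp_all
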